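-- pv_equiv track=rewrite | github.com/konszymanski/leetcode-dataset | obfuscated_solutions/python/3356-zero-array-transformation-ii/solution_1_universal_wrap.py | can_form_zero_array
-- ===== SOURCE A (Python) =====
-- from typing import List
--
-- def can_form_zero_array(nums: List[int], queries: List[List[int]],
--     k: int) ->bool:
--     if True:
--         n = len(nums)
--     if True:
--         total_sum = 0
--     difference_array = [0] * (n + 1)
--     if True:
--         for query_index in range(k):
--             start, end, val = queries[query_index]
--             difference_array[start] += val
--             difference_array[end + 1] -= val
--     if True:
--         for num_index in range(n):
--             total_sum += difference_array[num_index]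
--             if total_sum < nums[num_index]:
--                 return False
--     if True:
--         return True
-- ===== SOURCE B (Python) =====
-- def can_form_zero_array(nums, queries, k):
--     active = queries[:max(k, 0)]
--     for i, need in enumerate(nums):
--         covered = sum(v for s, e, v in active if s <= i <= e)
--         if covered < need:
--             return False
--     return True
-- ===== Notes on version B (the rewrite author's own statement) =====
-- stated objective: simpler
-- what changed: Replaces the mutated difference array and running prefix sum with a direct per-position sum of the values of the covering queries among queries[:k].
-- outside the precondition, e.g. on can_form_zero_array([5], [[-1, 0, 5]], 1): A returns False, B returns True; on can_form_zero_array([-4, 0], [[1, -1, 5]], 1): A returns False, B returns True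
import Mathlib
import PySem

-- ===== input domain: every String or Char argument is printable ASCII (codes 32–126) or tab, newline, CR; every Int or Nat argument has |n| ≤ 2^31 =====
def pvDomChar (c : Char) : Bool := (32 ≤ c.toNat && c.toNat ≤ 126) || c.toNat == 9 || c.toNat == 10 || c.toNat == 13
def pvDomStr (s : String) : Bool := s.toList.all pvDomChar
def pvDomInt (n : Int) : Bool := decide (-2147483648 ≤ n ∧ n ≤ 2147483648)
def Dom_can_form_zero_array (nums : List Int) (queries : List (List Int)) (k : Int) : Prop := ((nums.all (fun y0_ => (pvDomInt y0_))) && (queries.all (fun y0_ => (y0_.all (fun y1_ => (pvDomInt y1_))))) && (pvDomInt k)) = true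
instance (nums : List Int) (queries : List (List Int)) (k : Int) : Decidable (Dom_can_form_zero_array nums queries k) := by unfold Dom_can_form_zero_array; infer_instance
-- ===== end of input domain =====

-- B replaces A's difference array + running prefix sum with a direct per-position
-- sum over the covering queries (simpler, no mutation); equivalence is proved on
-- Pre_, the natural domain of the problem (0 ≤ k ≤ len(queries), well-formed queries).

-- ===== PORT A =====
-- one body of A's first loop: start,end,val = q; diff[start] += val; diff[end+1] -= val
-- (difference_array index out of range would raise in Python; pySetD/pyGetD are exact in range, Pre_ keeps us there)
def aStep (d : List Int) (q : List Int) : List Int :=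
  match q with
  | [s, e, v] =>
    let d1 := PySem.List.pySetD d s (PySem.List.pyGetD d s 0 + v)
    PySem.List.pySetD d1 (e + 1) (PySem.List.pyGetD d1 (e + 1) 0 - v)
  | _ => d  -- Python raises ValueError on unpacking; unreachable under Pre_

-- A's second loop: running total with early return False
def aLoop (diff nums : List Int) (total : Int) : List Int → Bool
  | [] => true
  | i :: rest =>
    let total' := total + PySem.List.pyGetD diff i 0
    if total' < PySem.List.pyGetD nums i 0 then false else aLoop diff nums total' rest

def can_form_zero_array (nums : List Int) (queries : List (List Int)) (k : Int) : Bool :=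
  aLoop
    ((PySem.List.pyRange 0 k 1).foldl
      (fun d qi => aStep d (PySem.List.pyGetD queries qi []))
      (List.replicate (nums.length + 1) 0))
    nums 0 (PySem.List.pyRange 0 (nums.length : Int) 1)

-- ===== PORT B =====
-- sum(v for s, e, v in active if s <= i <= e)
def altCovered (active : List (List Int)) (i : Int) : Int :=
  (active.filterMap (fun q =>
    match q with
    | [s, e, v] => if s ≤ i ∧ i ≤ e then some v else none
    | _ => none)).sum

-- for i, need in enumerate(nums): …
def altLoop (active : List (List Int)) (i : Int) : List Int → Bool
  | [] => true
  | need :: rest =>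
    if altCovered active i < need then false else altLoop active (i + 1) rest

def can_form_zero_array_alt (nums : List Int) (queries : List (List Int)) (k : Int) : Bool :=
  altLoop (PySem.List.slice queries none (some (max k 0))) 0 nums

-- ===== PRECONDITION & SPEC =====
-- Pre_ excludes inputs where A raises (k > len(queries), malformed or out-of-range query indices)
-- and, as defensible-corner artefacts no caller would specify, queries with
-- negative or reversed (end + 1 < start) bounds, where A's value comes from Python's
-- negative-index wraparound / a negative running offset (see the cited examples).
def Pre_can_form_zero_array (nums : List Int) (queries : List (List Int)) (k : Int) : Prop :=
  k ≤ queries.length ∧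
    ∀ q ∈ queries.take k.toNat,
      q.length = 3 ∧ 0 ≤ q.getD 0 0 ∧ q.getD 0 0 ≤ q.getD 1 0 + 1 ∧ q.getD 1 0 < (nums.length : Int)
instance (nums : List Int) (queries : List (List Int)) (k : Int) : Decidable (Pre_can_form_zero_array nums queries k) := by unfold Pre_can_form_zero_array; infer_instance

def pvWitness_can_form_zero_array : List Int × List (List Int) × Int := ([1, 0], [[0, 0, 2], [1, 1, 1]], 2)

def Spec_can_form_zero_array (nums : List Int) (queries : List (List Int)) (k : Int) (out : Bool) : Prop := out = can_form_zero_array_alt nums queries k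
instance (nums : List Int) (queries : List (List Int)) (k : Int) (out : Bool) : Decidable (Spec_can_form_zero_array nums queries k out) := by unfold Spec_can_form_zero_array; infer_instance

-- ===== CLAIM (what is proved, stated in full; the proofs are below) =====
def Claim_equal_can_form_zero_array : Prop := ∀ (nums : List Int) (queries : List (List Int)) (k : Int), Dom_can_form_zero_array nums queries k → Pre_can_form_zero_array nums queries k → Spec_can_form_zero_array nums queries k (can_form_zero_array nums queries k)

-- ===== LEMMAS AND PROOFS =====

-- a query accepted by Pre_
def QOk (n : Int) (q : List Int) : Prop :=
  q.length = 3 ∧ 0 ≤ q.getD 0 0 ∧ q.getD 0 0 ≤ q.getD 1 0 + 1 ∧ q.getD 1 0 < n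

-- sum of the first j entries
def tkSum (d : List Int) (j : Nat) : Int := ((d.take j).sum)

lemma length_aStep (d q : List Int) : (aStep d q).length = d.length := by
  unfold aStep
  cases q with
  | nil => rfl
  | cons a t => cases t with
    | nil => rfl
    | cons b t2 => cases t2 with
      | nil => rfl
      | cons c t3 => cases t3 with
        | nil => simp [PySem.List.length_pySetD]
        | cons _ _ => rfl

lemma length_foldl_aStep (Q : List (List Int)) (d : List Int) :
    (Q.foldl aStep d).length = d.length := by
  induction Q generalizing d with
  | nil => rfl
  | cons q Q ih => simp [List.foldl_cons, ih, length_aStep]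

lemma sum_take_set (d : List Int) (m j : Nat) (w : Int) (hm : m < d.length) :
    ((d.set m w).take j).sum = (d.take j).sum + (if m < j then w - d.getD m 0 else 0) := by
  induction d generalizing m j with
  | nil => simp at hm
  | cons x xs ih =>
    cases m with
    | zero =>
      cases j with
      | zero => simp
      | succ j => simp [List.getD]; ring
    | succ m =>
      cases j with
      | zero => simp
      | succ j =>
        have hm' : m < xs.length := by simpa using hm
        simp only [List.set_cons_succ, List.take_succ_cons, List.sum_cons, ih m j hm',
          List.getD_cons_succ, Nat.add_lt_add_iff_right]
        ring

lemma aStep_cons (d : List Int) (s e v : Int) :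
    aStep d [s, e, v]
      = PySem.List.pySetD (PySem.List.pySetD d s (PySem.List.pyGetD d s 0 + v)) (e + 1)
          (PySem.List.pyGetD (PySem.List.pySetD d s (PySem.List.pyGetD d s 0 + v)) (e + 1) 0 - v) := rfl

lemma tkSum_aStep (d q : List Int) (n : Int) (hd : (d.length : Int) = n + 1)
    (hq : QOk n q) (j : Nat) :
    tkSum (aStep d q) j = tkSum d j
      + ((if q.getD 0 0 < (j : Int) then q.getD 2 0 else 0)
        - (if q.getD 1 0 + 1 < (j : Int) then q.getD 2 0 else 0)) := by
  obtain ⟨hlen, h0, h01, h1n⟩ := hq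
  match q, hlen with
  | [s, e, v], _ =>
    simp only [List.getD, List.getElem?_cons_zero, List.getElem?_cons_succ, Option.getD_some] at h0 h01 h1n ⊢
    have he1 : 0 ≤ e + 1 := by omega
    have hsd : s.toNat < d.length := by omega
    have hed : (e + 1).toNat < (PySem.List.pySetD d s (PySem.List.pyGetD d s 0 + v)).length := by
      rw [PySem.List.length_pySetD]; omega
    unfold tkSum
    rw [aStep_cons]
    rw [PySem.List.pySetD_of_nonneg _ _ h0, PySem.List.pySetD_of_nonneg _ _ he1]
    rw [PySem.List.pySetD_of_nonneg _ _ h0] at hed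
    rw [sum_take_set _ _ _ _ hed]
    rw [sum_take_set _ _ _ _ hsd]
    have hg1 : PySem.List.pyGetD d s 0 = d.getD s.toNat 0 := by
      rw [PySem.List.pyGetD_eq_getElem d 0 h0 (by omega)]
      rw [List.getD_eq_getElem d 0 hsd]
    have hg2 : PySem.List.pyGetD (d.set s.toNat (d.getD s.toNat 0 + v)) (e + 1) 0
        = (d.set s.toNat (d.getD s.toNat 0 + v)).getD (e + 1).toNat 0 := by
      rw [PySem.List.pyGetD_eq_getElem _ 0 he1 (by simp; omega)]
      exact (List.getD_eq_getElem _ _ (by simp; omega)).symm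
    rw [hg1] at hed ⊢
    rw [hg2]
    have hc1 : (s.toNat < j) ↔ (s < (j : Int)) := by omega
    have hc2 : ((e + 1).toNat < j) ↔ (e + 1 < (j : Int)) := by omega
    split_ifs <;> omega

-- contribution of all of Q to the prefix sum
lemma tkSum_foldl (n : Int) (Q : List (List Int)) (d : List Int)
    (hd : (d.length : Int) = n + 1) (hQ : ∀ q ∈ Q, QOk n q) (j : Nat) :
    tkSum (Q.foldl aStep d) j = tkSum d j
      + (Q.map (fun q => (if q.getD 0 0 < (j : Int) then q.getD 2 0 else 0)
          - (if q.getD 1 0 + 1 < (j : Int) then q.getD 2 0 else 0))).sum := by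
  induction Q generalizing d with
  | nil => simp
  | cons q Q ih =>
    have hq := hQ q (by simp)
    have hd' : ((aStep d q).length : Int) = n + 1 := by rw [length_aStep]; exact hd
    simp only [List.foldl_cons, List.map_cons, List.sum_cons]
    rw [ih (aStep d q) hd' (fun p hp => hQ p (by simp [hp]))]
    rw [tkSum_aStep d q n hd hq j]
    ring

lemma altCovered_cons (q : List Int) (Q : List (List Int)) (i : Int) :
    altCovered (q :: Q) i
      = (match q with
         | [s, e, v] => if s ≤ i ∧ i ≤ e then v else 0
         | _ => 0) + altCovered Q i := by
  unfold altCovered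
  cases q with
  | nil => simp
  | cons a t => cases t with
    | nil => simp
    | cons b t2 => cases t2 with
      | nil => simp
      | cons c t3 => cases t3 with
        | nil =>
          simp only [List.filterMap_cons]
          split_ifs with h <;> simp
        | cons _ _ => simp

lemma altCovered_eq_sum (n : Int) (Q : List (List Int)) (hQ : ∀ q ∈ Q, QOk n q) (i : Int) :
    altCovered Q i
      = (Q.map (fun q => if q.getD 0 0 ≤ i ∧ i ≤ q.getD 1 0 then q.getD 2 0 else 0)).sum := by
  induction Q with
  | nil => rfl
  | cons q Q ih =>
    have hq := hQ q (by simp)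
    have ih' := ih (fun p hp => hQ p (by simp [hp]))
    obtain ⟨hlen, -, -, -⟩ := hq
    rw [altCovered_cons, ih']
    match q, hlen with
    | [s, e, v], _ =>
      simp [List.getD]

-- main loop equivalence, by downward induction on n - j
lemma loops_eq (nums : List Int) (Q : List (List Int))
    (hQ : ∀ q ∈ Q, QOk (nums.length : Int) q)
    (diff : List Int) (hdiff : diff = Q.foldl aStep (List.replicate (nums.length + 1) 0)) :
    ∀ (fuel j : Nat), fuel = nums.length - j →
      aLoop diff nums (tkSum diff j) (PySem.List.pyRange (j : Int) (nums.length : Int) 1)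
        = altLoop Q (j : Int) (nums.drop j) := by
  intro fuel
  induction fuel with
  | zero =>
    intro j hj
    have hjn : nums.length ≤ j := by omega
    have h1 : PySem.List.pyRange (j : Int) (nums.length : Int) 1 = [] := by
      rw [PySem.List.pyRange_one]
      have : ((nums.length : Int) - j).toNat = 0 := by omega
      simp [this]
    have h2 : nums.drop j = [] := List.drop_eq_nil_of_le hjn
    rw [h1, h2]; rfl
  | succ fuel ih =>
    intro j hj
    have hjn : j < nums.length := by omega
    have hdl : diff.length = nums.length + 1 := by
      rw [hdiff, length_foldl_aStep]; simp
    -- unfold one step of the range and of the drop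
    rw [PySem.List.pyRange_one_cons (by omega)]
    rw [List.drop_eq_getElem_cons hjn]
    -- the updated total is the (j+1)-prefix sum
    have htot : tkSum diff j + PySem.List.pyGetD diff (j : Int) 0 = tkSum diff (j + 1) := by
      have hsucc : (List.take (j + 1) diff).sum = (List.take j diff).sum + diff[j] := by
        rw [List.take_add_one, List.getElem?_eq_getElem (show j < diff.length by omega)]
        rw [Option.toList_some, List.sum_append, List.sum_cons, List.sum_nil]
        ring
      unfold tkSum
      rw [PySem.List.pyGetD_eq_getElem diff 0 (by omega) (by omega), hsucc]
      simp
    -- the (j+1)-prefix sum is B's covered value at j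
    have hcov : tkSum diff (j + 1) = altCovered Q (j : Int) := by
      rw [hdiff, tkSum_foldl (nums.length : Int) Q _ (by simp) hQ (j + 1)]
      rw [altCovered_eq_sum (nums.length : Int) Q hQ (j : Int)]
      have hz : tkSum (List.replicate (nums.length + 1) 0) (j + 1) = 0 := by
        unfold tkSum
        rw [List.take_replicate]
        simp
      rw [hz, zero_add]
      congr 1
      apply List.map_congr_left
      intro q hq
      obtain ⟨-, h0, h01, -⟩ := hQ q hq
      push_cast
      split_ifs <;> first | rfl | omega
    have hnum : PySem.List.pyGetD nums (j : Int) 0 = nums[j] := by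
      rw [PySem.List.pyGetD_eq_getElem nums 0 (by omega) (by omega)]
      simp
    show (if tkSum diff j + PySem.List.pyGetD diff (j : Int) 0 < PySem.List.pyGetD nums (j : Int) 0
          then false
          else aLoop diff nums (tkSum diff j + PySem.List.pyGetD diff (j : Int) 0)
            (PySem.List.pyRange ((j : Int) + 1) (nums.length : Int) 1)) = _
    rw [htot, hcov, hnum]
    unfold altLoop
    split_ifs with h
    · rfl
    · rw [← hcov]
      have hc : ((j : Int) + 1) = ((j + 1 : Nat) : Int) := by push_cast; ring
      rw [hc]
      exact ih (j + 1) (by omega)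

-- ===== VERDICT (by name: the statement is the Claim_ definition above) =====
theorem can_form_zero_array_spec : Claim_equal_can_form_zero_array := by
  intro nums queries k _hdom hpre
  obtain ⟨hklen, hq⟩ := hpre
  unfold Spec_can_form_zero_array can_form_zero_array can_form_zero_array_alt
  set Q := queries.take k.toNat with hQdef
  -- A's first loop folds over exactly the first k queries
  have hfold : (PySem.List.pyRange 0 k 1).foldl
      (fun d qi => aStep d (PySem.List.pyGetD queries qi []))
      (List.replicate (nums.length + 1) 0)
      = Q.foldl aStep (List.replicate (nums.length + 1) 0) := by
    have hlenQ : Q.length = k.toNat := by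
      rw [hQdef, List.length_take]; omega
    have hrange : PySem.List.pyRange 0 k 1 = PySem.List.pyRange 0 ((Q.length : Int)) 1 := by
      rw [PySem.List.pyRange_one, PySem.List.pyRange_one]
      congr 2
      omega
    have hcongr : (PySem.List.pyRange 0 k 1).foldl
        (fun d qi => aStep d (PySem.List.pyGetD queries qi []))
        (List.replicate (nums.length + 1) 0)
        = (PySem.List.pyRange 0 k 1).foldl
        (fun d qi => aStep d (PySem.List.pyGetD Q qi []))
        (List.replicate (nums.length + 1) 0) := by
      apply PySem.List.foldl_congr_mem
      intro d qi hqi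
      have hmem := (PySem.List.mem_pyRange_one).1 hqi
      congr 1
      rw [hQdef]
      rw [PySem.List.pyGetD_eq_getElem queries [] hmem.1 (by omega)]
      rw [PySem.List.pyGetD_eq_getElem (queries.take k.toNat) []
        hmem.1 (by rw [List.length_take]; omega)]
      rw [List.getElem_take]
    rw [hcongr, hrange]
    have hfr := PySem.List.foldl_pyRange_pyGetD' Q ([] : List Int) aStep
      (List.replicate (nums.length + 1) (0 : Int)) (a := 0) (by omega)
    rw [hfr]
    simp
  have hslice : PySem.List.slice queries none (some (max k 0)) = Q := by
    rw [hQdef, PySem.List.slice_to queries (le_max_right k 0)]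
    congr 1
    omega
  have hQok : ∀ q ∈ Q, QOk (nums.length : Int) q := by
    intro q hqm
    exact hq q (by rwa [hQdef] at hqm)
  have h0 : tkSum (Q.foldl aStep (List.replicate (nums.length + 1) 0)) 0 = 0 := by
    unfold tkSum; simp
  have := loops_eq nums Q hQok (Q.foldl aStep (List.replicate (nums.length + 1) 0)) rfl
    nums.length 0 (by omega)
  simp only [Nat.cast_zero] at this
  rw [hfold, hslice, ← h0]
  exact this
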